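-- pv_equiv track=rewrite | github.com/Gideon-Stein/jena_experiment_tool_box | jena_experiment_display/tools.py | transform_values_to_heat
-- ===== SOURCE A (Python) =====
-- def transform_values_to_heat(data, colors):
--     threshholds = list(colors.keys())
--     threshholds.sort()
--     threshholds.reverse()
--     result = []
--     for x in data:
--         for y in threshholds:
--             if x >= y:
--                 result.append(tuple(colors[y]))
--                 break
--             else:
--                 pass
--     return result
-- ===== SOURCE B (Python) =====
-- def transform_values_to_heat(data, colors):
--     # Faster: sort thresholds once ascending, then per data point a hand-written
--     # binary search (bisect_right) finds the largest threshold <= x.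
--     ths = sorted(colors.keys())
--     vals = [tuple(colors[t]) for t in ths]
--     n = len(ths)
--     out = []
--     for x in data:
--         lo, hi = 0, n
--         while lo < hi:
--             mid = (lo + hi) // 2
--             if ths[mid] <= x:
--                 lo = mid + 1
--             else:
--                 hi = mid
--         if lo:
--             out.append(vals[lo - 1])
--     return out
-- ===== Notes on version B (the rewrite author's own statement) =====
-- stated objective: faster
-- what changed: B sorts the thresholds ascending once and replaces A's per-element linear scan of the descending threshold list with a hand-written binary search (bisect_right) over the sorted thresholds, with color tuples precomputed per threshold.
import Mathlib
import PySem

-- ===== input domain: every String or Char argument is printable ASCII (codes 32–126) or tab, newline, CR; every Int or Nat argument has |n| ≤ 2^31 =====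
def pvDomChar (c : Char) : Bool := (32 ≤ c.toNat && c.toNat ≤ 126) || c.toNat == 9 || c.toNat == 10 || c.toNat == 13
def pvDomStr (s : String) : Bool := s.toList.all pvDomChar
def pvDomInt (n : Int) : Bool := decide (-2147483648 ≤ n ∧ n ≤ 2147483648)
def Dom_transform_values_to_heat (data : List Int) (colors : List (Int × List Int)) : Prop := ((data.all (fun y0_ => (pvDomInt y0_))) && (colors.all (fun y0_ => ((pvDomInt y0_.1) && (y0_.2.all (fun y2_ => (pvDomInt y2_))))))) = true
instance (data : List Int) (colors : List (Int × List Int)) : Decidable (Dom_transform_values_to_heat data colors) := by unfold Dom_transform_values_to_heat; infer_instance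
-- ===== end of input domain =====

-- B replaces A's per-element linear scan of the descending threshold list by a binary
-- search over the ascending sorted thresholds (asymptotically faster per data point).


-- ===== PORT A =====
-- inner 'for y in threshholds: if x >= y: append; break' = first y in the list with x ≥ y
def firstGe (x : Int) : List Int → Option Int
  | [] => none
  | y :: ys => if x ≥ y then some y else firstGe x ys

def transform_values_to_heat (data : List Int) (colors : List (Int × List Int)) : List (List Int) :=
  let d := PySem.Dict.ofList colors
  let threshholds := (PySem.List.sorted d.keys (fun x => x) false).reverse
  data.foldl (fun result x =>
    match firstGe x threshholds with
    | some y => result ++ [d.getD y []]   -- y is a key of d, so colors[y] never raises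
    | none => result) []

-- ===== PORT B =====
-- Source B's while-loop binary search (bisect_right); ths[mid] is always in range, so getD is exact
def bsr (ths : List Int) (x : Int) (lo hi : Nat) : Nat :=
  if _h : lo < hi then
    let mid := (lo + hi) / 2
    if ths.getD mid 0 ≤ x then bsr ths x (mid + 1) hi
    else bsr ths x lo mid
  else lo
termination_by hi - lo
decreasing_by all_goals omega

def transform_values_to_heat_alt (data : List Int) (colors : List (Int × List Int)) : List (List Int) :=
  let d := PySem.Dict.ofList colors
  let ths := PySem.List.sorted d.keys (fun x => x) false
  let vals := ths.map (fun t => d.getD t [])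
  data.foldl (fun out x =>
    let k := bsr ths x 0 ths.length
    if k ≠ 0 then out ++ [vals.getD (k - 1) []] else out) []   -- k-1 < ths.length always

-- ===== PRECONDITION & SPEC =====
def Spec_transform_values_to_heat (data : List Int) (colors : List (Int × List Int)) (out : List (List Int)) : Prop := out = transform_values_to_heat_alt data colors
instance (data : List Int) (colors : List (Int × List Int)) (out : List (List Int)) : Decidable (Spec_transform_values_to_heat data colors out) := by unfold Spec_transform_values_to_heat; infer_instance

-- ===== CLAIM (what is proved, stated in full; the proofs are below) =====
def Claim_equal_transform_values_to_heat : Prop := ∀ (data : List Int) (colors : List (Int × List Int)), Dom_transform_values_to_heat data colors → Spec_transform_values_to_heat data colors (transform_values_to_heat data colors)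

-- ===== LEMMAS AND PROOFS =====

-- sorted lists: getD is monotone in the index
lemma getD_mono_of_pairwise (l : List Int) (hs : l.Pairwise (· ≤ ·))
    {i j : Nat} (hij : i ≤ j) (hj : j < l.length) :
    l.getD i 0 ≤ l.getD j 0 := by
  rcases Nat.lt_or_ge i j with h | h
  · rw [List.getD_eq_getElem l 0 (Nat.lt_of_le_of_lt hij hj), List.getD_eq_getElem l 0 hj]
    exact (List.pairwise_iff_getElem.mp hs) i j _ hj h
  · have : i = j := Nat.le_antisymm hij h
    subst this; rfl

-- binary-search specification: bsr returns the split point of the sorted list around x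
lemma bsr_spec (l : List Int) (x : Int) (hs : l.Pairwise (· ≤ ·)) :
    ∀ lo hi, lo ≤ hi → hi ≤ l.length →
    (∀ i, i < lo → l.getD i 0 ≤ x) →
    (∀ i, hi ≤ i → i < l.length → x < l.getD i 0) →
    (bsr l x lo hi ≤ l.length ∧
     (∀ i, i < bsr l x lo hi → l.getD i 0 ≤ x) ∧
     (∀ i, bsr l x lo hi ≤ i → i < l.length → x < l.getD i 0)) := by
  intro lo hi
  induction lo, hi using bsr.induct l x with
  | case1 lo hi h mid hmid ih =>
    intro _ hhi hlo hup
    rw [bsr, dif_pos h]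
    simp only
    rw [if_pos hmid]
    exact ih (by omega) hhi
      (fun i hi2 => le_trans (getD_mono_of_pairwise l hs (by omega) (by omega)) hmid)
      hup
  | case2 lo hi h mid hmid ih =>
    intro hlh hhi hlo hup
    rw [bsr, dif_pos h]
    simp only
    rw [if_neg hmid]
    rw [not_le] at hmid
    exact ih (by omega) (by omega) hlo
      (fun i hi1 hi2 => lt_of_lt_of_le hmid (getD_mono_of_pairwise l hs hi1 hi2))
  | case3 lo hi h =>
    intro hlh hhi hlo hup
    rw [bsr, dif_neg h]
    exact ⟨by omega, hlo, fun i h1 h2 => hup i (by omega) h2⟩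

-- first element ≥-hit in the REVERSED list is the last element ≤ x of the list
lemma firstGe_reverse (x : Int) : ∀ (l : List Int) (k : Nat), k ≤ l.length →
    (∀ i, i < k → l.getD i 0 ≤ x) →
    (∀ i, k ≤ i → i < l.length → x < l.getD i 0) →
    firstGe x l.reverse = if k = 0 then none else some (l.getD (k - 1) 0) := by
  intro l
  induction l using List.reverseRecOn with
  | nil =>
    intro k hk _ _
    have : k = 0 := by simpa using hk
    simp [this, firstGe]
  | append_singleton l a ih =>
    intro k hk h1 h2
    rw [List.reverse_append, List.reverse_singleton, List.singleton_append]
    by_cases hxa : a ≤ x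
    · have hkl : k = l.length + 1 := by
        by_contra hne
        have hk' : k ≤ l.length := by simp at hk; omega
        have := h2 l.length hk' (by simp)
        rw [List.getD_eq_getElem _ 0 (by simp)] at this
        simp at this; omega
      have : firstGe x (a :: l.reverse) = some a := by
        simp [firstGe, ge_iff_le, hxa]
      rw [this, hkl, if_neg (by omega),
          List.getD_eq_getElem (l ++ [a]) 0 (by simp)]
      simp
    · have hk' : k ≤ l.length := by
        by_contra hgt
        have hkl : k = l.length + 1 := by simp at hk; omega
        have := h1 l.length (by omega)
        rw [List.getD_eq_getElem _ 0 (by simp)] at this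
        simp at this; omega
      have step : firstGe x (a :: l.reverse) = firstGe x l.reverse := by
        simp [firstGe, ge_iff_le, hxa]
      rw [step, ih k hk'
        (fun i hi => by
          have := h1 i hi
          rwa [List.getD_eq_getElem _ 0 (by simp; omega),
               List.getElem_append_left (by omega),
               ← List.getD_eq_getElem l 0 (by omega)] at this)
        (fun i hi1 hi2 => by
          have := h2 i hi1 (by simp; omega)
          rwa [List.getD_eq_getElem _ 0 (by simp; omega),
               List.getElem_append_left (by omega),
               ← List.getD_eq_getElem l 0 (by omega)] at this)]
      by_cases hk0 : k = 0
      · simp [hk0]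
      · have hlt : k - 1 < l.length := by omega
        rw [if_neg hk0, if_neg hk0,
            List.getD_eq_getElem (l ++ [a]) 0 (by simp; omega),
            List.getElem_append_left hlt, ← List.getD_eq_getElem l 0 hlt]

-- per-data-point agreement of the two loop bodies
lemma step_eq (d : PySem.Dict Int (List Int)) (x : Int) (acc : List (List Int))
    (ths : List Int) (hths : ths = PySem.List.sorted d.keys (fun x => x) false) :
    (match firstGe x ths.reverse with
      | some y => acc ++ [d.getD y []]
      | none => acc) =
    (if bsr ths x 0 ths.length ≠ 0 then
        acc ++ [(ths.map (fun t => d.getD t [])).getD (bsr ths x 0 ths.length - 1) []]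
      else acc) := by
  have hs : ths.Pairwise (· ≤ ·) := by
    rw [hths]
    have := PySem.List.sorted_pairwise (xs := d.keys) (key := fun x => x)
    simpa using this
  obtain ⟨hkle, hbelow, habove⟩ :=
    bsr_spec ths x hs 0 ths.length (Nat.zero_le _) le_rfl
      (fun i hi => absurd hi (Nat.not_lt_zero i)) (fun i hi1 hi2 => absurd hi2 (by omega))
  rw [firstGe_reverse x ths (bsr ths x 0 ths.length) hkle hbelow habove]
  by_cases hk0 : bsr ths x 0 ths.length = 0
  · simp [hk0]
  · have hlt : bsr ths x 0 ths.length - 1 < ths.length := by omega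
    rw [if_neg hk0, if_pos hk0,
        List.getD_eq_getElem (ths.map fun t => d.getD t []) [] (by simp [hlt]),
        List.getElem_map, ← List.getD_eq_getElem ths 0 hlt]

-- ===== VERDICT (by name: the statement is the Claim_ definition above) =====
theorem transform_values_to_heat_spec : Claim_equal_transform_values_to_heat := by
  intro data colors hdom
  clear hdom
  unfold Spec_transform_values_to_heat transform_values_to_heat transform_values_to_heat_alt
  simp only
  induction data using List.reverseRecOn with
  | nil => rfl
  | append_singleton l x ih =>
    rw [List.foldl_append, List.foldl_append, ih, List.foldl_cons, List.foldl_cons,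
        List.foldl_nil, List.foldl_nil, step_eq _ _ _ _ rfl]
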